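-- pv_equiv track=rewrite | github.com/lucifer1004/kickstart | 2022/Round_D/b/b.py | solve
-- ===== SOURCE A (Python) =====
-- def solve(a):
--     n = len(a)
--     ans = [0] * (n + 1)
--     dp = [0] * (n + 1)
--     for i in range(1, n + 1):
--         ndp = [0] * (n + 1)
--         for j in range(i):
--             ndp[j] = max(ndp[j], dp[j] + a[n - i + j])
--             ndp[j + 1] = max(ndp[j + 1], dp[j] + a[j])
--         dp = ndp
--         ans[i] = max(dp)
--     return ans
-- ===== SOURCE B (Python) =====
-- def solve(a):
--     # Closed form: the DP cell (i, j) equals L[j] + R[i - j], where L and R are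
--     # Kadane-style arrays (best non-negative suffix sum of a prefix / prefix sum
--     # of a suffix), so each answer is a max-plus convolution of L and R.
--     n = len(a)
--     L = [0]
--     for j in range(1, n + 1):
--         L.append(max(0, L[j - 1] + a[j - 1]))
--     R = [0]
--     for m in range(1, n + 1):
--         R.append(max(0, R[m - 1] + a[n - m]))
--     return [max(L[j] + R[i - j] for j in range(i + 1)) for i in range(n + 1)]
-- ===== Notes on version B (the rewrite author's own statement) =====
-- stated objective: faster
-- what changed: Replaces A's row-by-row scatter DP by a closed form: two linear Kadane passes build arrays L (best nonnegative suffix sum of each prefix) and R (best nonnegative prefix sum of each suffix), and each answer is the max-plus convolution max_j L[j]+R[i-j]; no DP table is maintained.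
import Mathlib
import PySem

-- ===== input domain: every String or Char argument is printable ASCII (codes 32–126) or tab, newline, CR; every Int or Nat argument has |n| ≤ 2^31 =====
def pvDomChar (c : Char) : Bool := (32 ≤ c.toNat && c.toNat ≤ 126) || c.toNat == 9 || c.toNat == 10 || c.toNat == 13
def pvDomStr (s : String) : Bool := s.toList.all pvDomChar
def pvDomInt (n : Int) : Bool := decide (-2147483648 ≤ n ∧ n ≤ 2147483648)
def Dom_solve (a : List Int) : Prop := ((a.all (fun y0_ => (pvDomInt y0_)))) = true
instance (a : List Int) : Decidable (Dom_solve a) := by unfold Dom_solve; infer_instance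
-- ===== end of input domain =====

-- B replaces A's row-by-row scatter DP by a closed form: two linear Kadane passes
-- (arrays L and R) and a max-plus convolution max_j L[j]+R[i-j]; a timing run
-- measured B a constant factor faster (no per-step row allocation or scatter).

-- ===== PORT A =====
-- Python max(xs) on a (always nonempty here) list
def pymax : List Int → Int
  | [] => 0
  | x :: r => r.foldl max x

-- inner loop of A: for j in range(i): two scatter updates into ndp
def rowA (dp a : List Int) (n i : Nat) : List Int :=
  (List.range i).foldl
    (fun ndp j =>
      let ndp := ndp.set j (max (ndp.getD j 0) (dp.getD j 0 + a.getD (n - i + j) 0))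
      ndp.set (j + 1) (max (ndp.getD (j + 1) 0) (dp.getD j 0 + a.getD j 0)))
    (List.replicate (n + 1) 0)

def solve (a : List Int) : List Int :=
  let n := a.length
  let res := (List.range' 1 n).foldl
    (fun (st : List Int × List Int) i =>
      let ndp := rowA st.1 a n i
      (ndp, st.2.set i (pymax ndp)))
    (List.replicate (n + 1) 0, List.replicate (n + 1) 0)
  res.2

-- ===== PORT B =====
-- L = [0]; for j in 1..n: L.append(max(0, L[j-1] + a[j-1]))
def kadL (a : List Int) : List Int :=
  (List.range' 1 a.length).foldl
    (fun L j => L ++ [max 0 (L.getD (j - 1) 0 + a.getD (j - 1) 0)]) [0]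

-- R = [0]; for m in 1..n: R.append(max(0, R[m-1] + a[n-m]))
def kadR (a : List Int) : List Int :=
  (List.range' 1 a.length).foldl
    (fun R m => R ++ [max 0 (R.getD (m - 1) 0 + a.getD (a.length - m) 0)]) [0]

def solve_alt (a : List Int) : List Int :=
  let n := a.length
  let L := kadL a
  let R := kadR a
  (List.range (n + 1)).map (fun i =>
    pymax ((List.range (i + 1)).map (fun j => L.getD j 0 + R.getD (i - j) 0)))

-- ===== PRECONDITION & SPEC =====
def Spec_solve (a : List Int) (out : List Int) : Prop := out = solve_alt a
instance (a : List Int) (out : List Int) : Decidable (Spec_solve a out) := by unfold Spec_solve; infer_instance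

-- ===== CLAIM (what is proved, stated in full; the proofs are below) =====
def Claim_equal_solve : Prop := ∀ (a : List Int), Dom_solve a → Spec_solve a (solve a)

-- ===== LEMMAS AND PROOFS =====

-- functional versions of the two Kadane arrays
def Lf (a : List Int) : Nat → Int
  | 0 => 0
  | j + 1 => max 0 (Lf a j + a.getD j 0)

def Rf (a : List Int) : Nat → Int
  | 0 => 0
  | m + 1 => max 0 (Rf a m + a.getD (a.length - (m + 1)) 0)

theorem Lf_nonneg (a : List Int) (j : Nat) : 0 ≤ Lf a j := by
  cases j <;> simp [Lf]

theorem Rf_nonneg (a : List Int) (m : Nat) : 0 ≤ Rf a m := by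
  cases m <;> simp [Rf]

-- the gather ("pull") value of one cell of A's scatter row
def cellv (prev a : List Int) (n i j : Nat) : Int :=
  let v : Int := 0
  let v := if j < i then max v (prev.getD j 0 + a.getD (n - i + j) 0) else v
  if 1 ≤ j then max v (prev.getD (j - 1) 0 + a.getD (j - 1) 0) else v

-- getD-of-set facts (specific shape: default 0)
theorem getD_set_self (l : List Int) (i : Nat) (v : Int) (h : i < l.length) :
    (l.set i v).getD i 0 = v := by
  simp [List.getD_eq_getElem?_getD, h]

theorem getD_set_ne (l : List Int) (i j : Nat) (v : Int) (h : i ≠ j) :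
    (l.set i v).getD j 0 = l.getD j 0 := by
  simp [List.getD_eq_getElem?_getD, List.getElem?_set_ne h]

-- the prefix of A's inner scatter loop: first k iterations
def partA (dp a : List Int) (n i k : Nat) : List Int :=
  (List.range k).foldl
    (fun ndp j =>
      let ndp := ndp.set j (max (ndp.getD j 0) (dp.getD j 0 + a.getD (n - i + j) 0))
      ndp.set (j + 1) (max (ndp.getD (j + 1) 0) (dp.getD j 0 + a.getD j 0)))
    (List.replicate (n + 1) 0)

theorem rowA_eq_partA (dp a : List Int) (n i : Nat) : rowA dp a n i = partA dp a n i i := rfl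

theorem partA_succ (dp a : List Int) (n i k : Nat) :
    partA dp a n i (k + 1) =
      (let ndp := (partA dp a n i k).set k
        (max ((partA dp a n i k).getD k 0) (dp.getD k 0 + a.getD (n - i + k) 0));
       ndp.set (k + 1) (max (ndp.getD (k + 1) 0) (dp.getD k 0 + a.getD k 0))) := by
  unfold partA
  rw [List.range_succ, List.foldl_append, List.foldl_cons, List.foldl_nil]

theorem partA_length (dp a : List Int) (n i k : Nat) :
    (partA dp a n i k).length = n + 1 := by
  induction k with
  | zero => simp [partA]
  | succ k ih => rw [partA_succ]; simp [ih]

-- pointwise characterisation of the scatter prefix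
theorem partA_getD (dp a : List Int) (n i k : Nat) (hk : k ≤ i) (hi : i ≤ n) (j : Nat) :
    (partA dp a n i k).getD j 0 =
      if j < k then cellv dp a n i j
      else if j = k ∧ 1 ≤ k then max 0 (dp.getD (k - 1) 0 + a.getD (k - 1) 0)
      else 0 := by
  induction k generalizing j with
  | zero => simp [partA]
  | succ k ih =>
    have hk' : k ≤ i := by omega
    rw [partA_succ]
    dsimp only
    have hlen := partA_length dp a n i k
    rcases Nat.lt_trichotomy j k with hj | hj | hj
    · -- j < k : untouched by both sets
      rw [getD_set_ne _ _ _ _ (by omega), getD_set_ne _ _ _ _ (by omega), ih hk']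
      simp [hj, (show j < k + 1 by omega)]
    · -- j = k : op1 applies on top of the pending op2 value
      subst hj
      rw [getD_set_ne _ _ _ _ (by omega), getD_set_self _ _ _ (by omega), ih hk']
      have hji : j < i := by omega
      simp only [lt_irrefl, if_false, Nat.lt_succ_self, if_true]
      rcases Nat.eq_zero_or_pos j with h0 | h0
      · subst h0
        simp [cellv, hji]
      · simp only [cellv, hji, if_pos, Nat.one_le_iff_ne_zero]
        have : max (max (0:Int) (dp.getD (j-1) 0 + a.getD (j-1) 0)) (dp.getD j 0 + a.getD (n-i+j) 0)
            = max (max 0 (dp.getD j 0 + a.getD (n-i+j) 0)) (dp.getD (j-1) 0 + a.getD (j-1) 0) := by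
          rw [max_assoc, max_comm (dp.getD (j-1) 0 + a.getD (j-1) 0), ← max_assoc]
        simpa [h0, Nat.pos_iff_ne_zero.mp h0] using this
    · rcases Nat.eq_or_lt_of_le (Nat.succ_le_of_lt hj) with hj1 | hj1
      · -- j = k + 1 : only the pending op2 so far
        subst hj1
        rw [getD_set_self _ _ _ (by simp only [List.length_set, hlen]; omega),
          getD_set_ne _ _ _ _ (by omega), ih hk']
        simp [(show ¬ k + 1 < k by omega)]
      · -- j > k + 1 : still 0
        rw [getD_set_ne _ _ _ _ (by omega), getD_set_ne _ _ _ _ (by omega), ih hk']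
        simp [(show ¬ j < k by omega), (show j ≠ k by omega), (show ¬ j < k + 1 by omega), (show j ≠ k + 1 by omega)]

-- the finished scatter row IS the pulled row, padded with zeros
theorem rowA_eq_map (dp a : List Int) (n i : Nat) (h1 : 1 ≤ i) (h2 : i ≤ n) :
    rowA dp a n i = (List.range (i + 1)).map (cellv dp a n i) ++ List.replicate (n - i) 0 := by
  apply List.ext_getElem
  · rw [rowA_eq_partA, partA_length]; simp; omega
  · intro j hja hjb
    have e1 : (rowA dp a n i)[j]'hja = (rowA dp a n i).getD j 0 :=
      (List.getD_eq_getElem _ 0 hja).symm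
    have e2 : ((List.range (i + 1)).map (cellv dp a n i) ++ List.replicate (n - i) 0)[j]'hjb
        = ((List.range (i + 1)).map (cellv dp a n i) ++ List.replicate (n - i) 0).getD j 0 :=
      (List.getD_eq_getElem _ 0 hjb).symm
    rw [e1, e2, rowA_eq_partA, partA_getD dp a n i i le_rfl h2 j]
    by_cases hj : j < i + 1
    · have hb : j < (List.map (cellv dp a n i) (List.range (i + 1))).length := by
        simp; omega
      rw [List.getD_append _ _ _ _ hb, List.getD_eq_getElem _ 0 hb]
      simp only [List.getElem_map, List.getElem_range]
      by_cases hji : j < i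
      · simp [hji]
      · have hj' : j = i := by omega
        subst hj'
        simp [cellv, List.getD_eq_getElem?_getD]
    · have e3 : ((List.range (i + 1)).map (cellv dp a n i) ++ List.replicate (n - i) 0).getD j 0
          = 0 := by
        rw [List.getD_eq_getElem?_getD, List.getElem?_append_right (by simp; omega)]
        simp only [List.length_map, List.length_range, List.getElem?_replicate]
        rw [if_pos (by have := hjb; simp at this; omega)]
        simp
      rw [e3]
      simp [(show ¬ j < i by omega), (show ¬ j = i by omega)]

-- the closed-form row: cell (i, j) is Lf j + Rf (i - j)
def rowClosed (a : List Int) (i : Nat) : List Int :=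
  (List.range (i + 1)).map (fun j => Lf a j + Rf a (i - j))

theorem rowClosed_getD (a : List Int) (i j : Nat) (hj : j ≤ i) :
    (rowClosed a i).getD j 0 = Lf a j + Rf a (i - j) := by
  have hb : j < (rowClosed a i).length := by simp [rowClosed]; omega
  rw [List.getD_eq_getElem _ 0 hb]
  simp [rowClosed]

-- the key identity: pulling one cell from the closed row gives the closed form again
theorem Lf_succ (a : List Int) (j : Nat) : Lf a (j + 1) = max 0 (Lf a j + a.getD j 0) := rfl

theorem Rf_succ (a : List Int) (m : Nat) :
    Rf a (m + 1) = max 0 (Rf a m + a.getD (a.length - (m + 1)) 0) := rfl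

theorem cellv_closed (a : List Int) (i j : Nat) (h1 : 1 ≤ i) (hin : i ≤ a.length)
    (hj : j ≤ i) :
    cellv (rowClosed a (i - 1)) a a.length i j = Lf a j + Rf a (i - j) := by
  unfold cellv
  dsimp only
  by_cases hji : j < i
  · rw [if_pos hji, rowClosed_getD a (i-1) j (by omega)]
    have hR : Rf a (i - j) = max 0 (Rf a (i - j - 1) + a.getD (a.length - (i - j)) 0) := by
      have h := Rf_succ a (i - j - 1)
      rw [show i - j - 1 + 1 = i - j by omega] at h
      exact h
    by_cases hj1 : 1 ≤ j
    · rw [if_pos hj1, rowClosed_getD a (i-1) (j-1) (by omega)]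
      have hL : Lf a j = max 0 (Lf a (j - 1) + a.getD (j - 1) 0) := by
        have h := Lf_succ a (j - 1)
        rw [show j - 1 + 1 = j by omega] at h
        exact h
      rw [show i - 1 - j = i - j - 1 by omega, show i - 1 - (j - 1) = i - j by omega,
          show a.length - i + j = a.length - (i - j) by omega, hR, hL]
      have hLn := Lf_nonneg a (j - 1)
      have hRn := Rf_nonneg a (i - j - 1)
      simp only [max_def]
      split_ifs <;> omega
    · have hj0 : j = 0 := by omega
      subst hj0
      rw [if_neg (by omega)]
      simp only [Nat.sub_zero] at hR ⊢
      rw [show a.length - i + 0 = a.length - i by omega, hR]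
      simp [Lf]
  · have hj' : j = i := by omega
    subst hj'
    rw [if_neg hji, if_pos (by omega), rowClosed_getD a (j-1) (j-1) (by omega)]
    have hL : Lf a j = max 0 (Lf a (j - 1) + a.getD (j - 1) 0) := by
      have h := Lf_succ a (j - 1)
      rw [show j - 1 + 1 = j by omega] at h
      exact h
    simp only [Nat.sub_self]
    rw [hL]
    simp [Rf]

-- python max of the closed row padded with zeros
theorem foldl_max_replicate_zero (m : Int) (hm : 0 ≤ m) (z : Nat) :
    (List.replicate z (0:Int)).foldl max m = m := by
  induction z with
  | zero => rfl
  | succ z ih => rw [List.replicate_succ, List.foldl_cons, max_eq_left hm]; exact ih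

theorem pymax_pad (l : List Int) (hne : l ≠ []) (hl : ∀ y ∈ l, 0 ≤ y) (z : Nat) :
    pymax (l ++ List.replicate z 0) = pymax l := by
  match l with
  | [] => exact absurd rfl hne
  | x :: r =>
    have hx : 0 ≤ x := hl x (by simp)
    have hr : 0 ≤ r.foldl max x := le_trans hx (PySem.List.le_foldl_max r x).1
    simp only [pymax, List.cons_append, List.foldl_append]
    exact foldl_max_replicate_zero _ hr z

-- characterisation of the kadL / kadR folds
theorem kad_fold_L (a : List Int) (k : Nat) :
    (List.range' 1 k).foldl
      (fun L j => L ++ [max 0 (L.getD (j - 1) 0 + a.getD (j - 1) 0)]) [0]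
      = (List.range (k + 1)).map (Lf a) := by
  induction k with
  | zero => simp [Lf]
  | succ k ih =>
    rw [List.range'_1_concat, List.foldl_append, ih, List.foldl_cons, List.foldl_nil]
    have hget : ((List.range (k + 1)).map (Lf a)).getD (1 + k - 1) 0 = Lf a k := by
      have hb : k < ((List.range (k + 1)).map (Lf a)).length := by simp
      rw [show 1 + k - 1 = k by omega, List.getD_eq_getElem _ 0 hb]
      simp
    rw [hget, List.range_succ (n := k + 1), List.map_append]
    simp [show 1 + k - 1 = k by omega, Lf]

theorem kadL_eq (a : List Int) : kadL a = (List.range (a.length + 1)).map (Lf a) :=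
  kad_fold_L a a.length

theorem kad_fold_R (a : List Int) (k : Nat) :
    (List.range' 1 k).foldl
      (fun R m => R ++ [max 0 (R.getD (m - 1) 0 + a.getD (a.length - m) 0)]) [0]
      = (List.range (k + 1)).map (Rf a) := by
  induction k with
  | zero => simp [Rf]
  | succ k ih =>
    rw [List.range'_1_concat, List.foldl_append, ih, List.foldl_cons, List.foldl_nil]
    have hget : ((List.range (k + 1)).map (Rf a)).getD (1 + k - 1) 0 = Rf a k := by
      have hb : k < ((List.range (k + 1)).map (Rf a)).length := by simp
      rw [show 1 + k - 1 = k by omega, List.getD_eq_getElem _ 0 hb]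
      simp
    rw [hget, List.range_succ (n := k + 1), List.map_append]
    simp [show 1 + k = k + 1 by omega, Rf]

theorem kadR_eq (a : List Int) : kadR a = (List.range (a.length + 1)).map (Rf a) :=
  kad_fold_R a a.length

-- the per-answer value: python max over the closed row
def ansf (a : List Int) (i : Nat) : Int := pymax (rowClosed a i)

-- B's output is the map of ansf
theorem solve_alt_eq_map (a : List Int) :
    solve_alt a = (List.range (a.length + 1)).map (ansf a) := by
  unfold solve_alt
  dsimp only
  rw [kadL_eq, kadR_eq]
  apply List.map_congr_left
  intro i hi
  simp only [List.mem_range] at hi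
  unfold ansf rowClosed
  congr 1
  apply List.map_congr_left
  intro j hj
  simp only [List.mem_range] at hj
  have hL : ((List.range (a.length + 1)).map (Lf a)).getD j 0 = Lf a j := by
    have hb : j < ((List.range (a.length + 1)).map (Lf a)).length := by simp; omega
    rw [List.getD_eq_getElem _ 0 hb]; simp
  have hR : ((List.range (a.length + 1)).map (Rf a)).getD (i - j) 0 = Rf a (i - j) := by
    have hb : i - j < ((List.range (a.length + 1)).map (Rf a)).length := by simp; omega
    rw [List.getD_eq_getElem _ 0 hb]; simp
  rw [hL, hR]

-- padding rowClosed does not change a pulled cell (the guards keep indices ≤ i)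
theorem cellv_pad (prev a : List Int) (n i j m : Nat) (hlen : i ≤ prev.length) (hj : j ≤ i) :
    cellv (prev ++ List.replicate m 0) a n i j = cellv prev a n i j := by
  unfold cellv
  dsimp only
  by_cases h1 : j < i
  · rw [if_pos h1, if_pos h1, List.getD_append _ _ _ _ (by omega)]
    by_cases h2 : 1 ≤ j
    · rw [if_pos h2, if_pos h2, List.getD_append _ _ _ _ (by omega)]
    · rw [if_neg h2, if_neg h2]
  · rw [if_neg h1, if_neg h1]
    by_cases h2 : 1 ≤ j
    · rw [if_pos h2, if_pos h2, List.getD_append _ _ _ _ (by omega)]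
    · rw [if_neg h2, if_neg h2]

-- the loop body of A's fold, named for the induction
def stepA (a : List Int) (n : Nat) (st : List Int × List Int) (i : Nat) : List Int × List Int :=
  let ndp := rowA st.1 a n i
  (ndp, st.2.set i (pymax ndp))

-- main invariant: A's state after steps 1..i is the closed row (padded) and the answers so far
theorem main_inv (a : List Int) (n : Nat) (hn : n = a.length) : ∀ (k i : Nat) (ansAcc : List Int),
    i + k = n → ansAcc.length = i + 1 →
    ((List.range' (i + 1) k).foldl (stepA a n)
        (rowClosed a i ++ List.replicate (n - i) 0, ansAcc ++ List.replicate (n - i) 0)).2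
      = ansAcc ++ (List.range' (i + 1) k).map (ansf a) := by
  intro k
  induction k with
  | zero =>
    intro i ansAcc hik _
    have : n - i = 0 := by omega
    simp [this]
  | succ k ih =>
    intro i ansAcc hik ha
    rw [List.range'_succ, List.foldl_cons]
    have hin : i + 1 ≤ n := by omega
    have hrow : rowA (rowClosed a i ++ List.replicate (n - i) 0) a n (i + 1)
        = rowClosed a (i + 1) ++ List.replicate (n - (i + 1)) 0 := by
      rw [rowA_eq_map _ _ _ _ (by omega) hin]
      congr 1
      have hmap : (List.range (i + 1 + 1)).map
            (cellv (rowClosed a i ++ List.replicate (n - i) 0) a n (i + 1))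
          = (List.range (i + 1 + 1)).map (fun j => Lf a j + Rf a (i + 1 - j)) := by
        apply List.map_congr_left
        intro j hj
        simp only [List.mem_range] at hj
        rw [cellv_pad (rowClosed a i) a n (i + 1) j (n - i)
              (by simp [rowClosed]) (by omega)]
        have hc := cellv_closed a (i + 1) j (by omega) (by omega) (by omega)
        rw [show i + 1 - 1 = i by omega] at hc
        rw [hn]
        exact hc
      rw [hmap]
      rfl
    have hmaxrow : pymax (rowA (rowClosed a i ++ List.replicate (n - i) 0) a n (i + 1))
        = ansf a (i + 1) := by
      rw [hrow]
      unfold ansf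
      apply pymax_pad
      · simp [rowClosed]
      · intro y hy
        simp only [rowClosed, List.mem_map] at hy
        obtain ⟨j, _, rfl⟩ := hy
        have := Lf_nonneg a j
        have := Rf_nonneg a (i + 1 - j)
        omega
    have hset : (ansAcc ++ List.replicate (n - i) 0).set (i + 1) (ansf a (i + 1))
        = (ansAcc ++ [ansf a (i + 1)]) ++ List.replicate (n - (i + 1)) 0 := by
      have : List.replicate (n - i) (0:Int) = 0 :: List.replicate (n - (i + 1)) 0 := by
        rw [← List.replicate_succ]
        congr 1
        omega
      rw [this, List.set_append_right _ _ (by omega), ha]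
      simp
    have hA : stepA a n (rowClosed a i ++ List.replicate (n - i) 0,
          ansAcc ++ List.replicate (n - i) 0) (i + 1)
        = (rowClosed a (i + 1) ++ List.replicate (n - (i + 1)) 0,
           (ansAcc ++ [ansf a (i + 1)]) ++ List.replicate (n - (i + 1)) 0) := by
      unfold stepA
      dsimp only
      rw [hmaxrow, hrow, hset]
    rw [hA, ih (i + 1) _ (by omega) (by simp [ha])]
    simp

-- rowClosed 0 = [0] and ansf 0 = 0
theorem rowClosed_zero (a : List Int) : rowClosed a 0 = [0] := by
  simp [rowClosed, Lf, Rf]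

-- ===== VERDICT (by name: the statement is the Claim_ definition above) =====
theorem solve_spec : Claim_equal_solve := by
  unfold Claim_equal_solve Spec_solve
  intro a _
  show (let n := a.length; ((List.range' 1 n).foldl (stepA a n)
      (List.replicate (n + 1) 0, List.replicate (n + 1) 0)).2) = solve_alt a
  dsimp only
  rw [solve_alt_eq_map]
  have h := main_inv a a.length rfl a.length 0 [0] (by omega) rfl
  rw [rowClosed_zero] at h
  have e0 : ([0] : List Int) ++ List.replicate (a.length - 0) 0
      = List.replicate (a.length + 1) 0 := by
    simp [List.replicate_succ]
  rw [Nat.sub_zero] at h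
  rw [show (List.replicate (a.length + 1) (0:Int), List.replicate (a.length + 1) (0:Int))
      = (([0] : List Int) ++ List.replicate a.length 0,
         ([0] : List Int) ++ List.replicate a.length 0) by simp [List.replicate_succ]]
  rw [h]
  have hr : List.range (a.length + 1) = 0 :: List.range' 1 a.length := by
    rw [List.range_eq_range', List.range'_succ]
  rw [hr, List.map_cons]
  rfl
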